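-- pv_equiv track=rewrite | github.com/szholobetsky/simrgl | 1bcoder/map_query.py | detect_ghosts
-- ===== SOURCE A (Python) =====
-- def detect_ghosts(dm_prev: dict, lm_prev: dict, dm_curr: dict) -> dict:
--     """Detect files deleted between snapshots that other files depended on.
--
--     Returns { deleted_file → [name, ...] } where names were actively called
--     in the previous snapshot and are now undefined.
--
--     Why cross-snapshot: map_index.py builds links only for names in global_index
--     (project-defined names). When a file is deleted, its names leave global_index,
--     so links to them also disappear from the current map — making the deletion
--     invisible to orphan counting. Cross-snapshot comparison catches this.
--     """
--     # files that were link targets in prev snapshot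
--     prev_targets: set = set()
--     for targets in lm_prev.values():
--         prev_targets.update(targets.keys())
--
--     # which of those no longer exist in current map
--     deleted = prev_targets - set(dm_curr.keys())
--
--     ghosts: dict = {}
--     for f in deleted:
--         called_names = set()
--         for targets in lm_prev.values():
--             if f in targets:
--                 called_names.update(targets[f].keys())
--         if called_names:
--             ghosts[f] = sorted(called_names)
--
--     return ghosts
-- ===== SOURCE B (Python) =====
-- def detect_ghosts(dm_prev: dict, lm_prev: dict, dm_curr: dict) -> dict:
--     # One pass over lm_prev builds target -> set of called names; then a single
--     # comprehension keeps targets missing from dm_curr with a non-empty name set.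
--     index: dict = {}
--     for targets in lm_prev.values():
--         for target, names in targets.items():
--             index[target] = index.get(target, set()) | names.keys()
--     return {t: sorted(names) for t, names in index.items()
--             if t not in dm_curr and names}
-- ===== Notes on version B (the rewrite author's own statement) =====
-- stated objective: faster
-- what changed: B builds a target->called-names index in one pass over lm_prev and derives the result with a single filter/map over that index, replacing A's collect-targets pass plus a full rescan of lm_prev for every deleted file.
import Mathlib
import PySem

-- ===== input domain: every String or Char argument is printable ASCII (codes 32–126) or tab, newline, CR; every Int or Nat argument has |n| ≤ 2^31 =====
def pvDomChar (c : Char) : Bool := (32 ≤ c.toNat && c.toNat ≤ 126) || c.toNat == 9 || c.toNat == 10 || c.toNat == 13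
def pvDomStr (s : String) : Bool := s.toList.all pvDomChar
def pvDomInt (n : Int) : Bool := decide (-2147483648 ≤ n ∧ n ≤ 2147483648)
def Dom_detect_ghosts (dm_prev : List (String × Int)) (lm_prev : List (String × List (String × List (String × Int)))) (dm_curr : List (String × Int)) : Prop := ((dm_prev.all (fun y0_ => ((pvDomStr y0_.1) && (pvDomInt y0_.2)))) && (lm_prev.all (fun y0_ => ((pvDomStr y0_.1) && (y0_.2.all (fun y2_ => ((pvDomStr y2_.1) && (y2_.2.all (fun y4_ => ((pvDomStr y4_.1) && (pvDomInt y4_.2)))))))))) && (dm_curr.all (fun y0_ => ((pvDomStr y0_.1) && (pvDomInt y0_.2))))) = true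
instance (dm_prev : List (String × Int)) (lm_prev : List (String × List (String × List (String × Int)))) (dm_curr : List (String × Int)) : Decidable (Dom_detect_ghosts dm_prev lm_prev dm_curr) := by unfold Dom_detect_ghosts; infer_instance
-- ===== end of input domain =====

-- B replaces A's collect-targets pass plus per-deleted-file rescan of lm_prev by one index-building
-- pass (target -> set of called names) and a single filter/map pass over that index (one pass instead
-- of a quadratic rescan). Return value only; neither version mutates its arguments.
-- In both ports sorted(...) on strings is PySem.List.sorted with key `String.toList`: Python's
-- code-point order on str is exactly lexicographic order on the character lists, so this is exact.

-- ===== PORT A =====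
def detect_ghosts (dm_prev : List (String × Int)) (lm_prev : List (String × List (String × List (String × Int)))) (dm_curr : List (String × Int)) : List (String × List String) :=
  -- prev_targets = set(); for targets in lm_prev.values(): prev_targets.update(targets.keys())
  let prev_targets : PySem.Set String :=
    lm_prev.foldl (fun s row => PySem.Set.update s (row.2.map (·.1))) PySem.Set.empty
  -- deleted = prev_targets - set(dm_curr.keys())
  let deleted : PySem.Set String :=
    PySem.Set.diff prev_targets (PySem.Set.ofList (dm_curr.map (·.1)))
  -- ghosts = {}; for f in deleted: …   (Set iteration ported in the Set's insertion order)
  let ghosts : PySem.Dict String (List String) :=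
    deleted.foldl (fun g f =>
      let called_names : PySem.Set String :=
        lm_prev.foldl (fun cs row =>
          if (row.2.map (·.1)).contains f then
            -- targets[f].keys(): dict lookup = first match in the association list
            PySem.Set.update cs ((((row.2.find? (fun q => q.1 == f)).getD (f, [])).2).map (·.1))
          else cs) PySem.Set.empty
      if called_names.isEmpty then g
      else g.insert f (PySem.List.sorted called_names (·.toList) false)) PySem.Dict.empty
  ghosts.items

-- ===== PORT B =====
def detect_ghosts_alt (dm_prev : List (String × Int)) (lm_prev : List (String × List (String × List (String × Int)))) (dm_curr : List (String × Int)) : List (String × List String) :=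
  -- index = {}; for targets in lm_prev.values(): for target, names in targets.items():
  --     index[target] = index.get(target, set()) | names.keys()
  let index : PySem.Dict String (PySem.Set String) :=
    lm_prev.foldl (fun d row =>
      row.2.foldl (fun d q =>
        d.insert q.1 (PySem.Set.union (d.getD q.1 PySem.Set.empty) (q.2.map (·.1)))) d)
      PySem.Dict.empty
  -- {t: sorted(names) for t, names in index.items() if t not in dm_curr and names}
  (index.items.filter (fun p => !((dm_curr.map (·.1)).contains p.1) && !p.2.isEmpty)).map
    (fun p => (p.1, PySem.List.sorted p.2 (·.toList) false))

-- ===== PRECONDITION & SPEC =====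
-- Pre_ only requires each inner `targets` association list to have distinct keys: it represents a
-- Python dict, which cannot carry duplicate keys, so no Python input is excluded.
def Pre_detect_ghosts (dm_prev : List (String × Int)) (lm_prev : List (String × List (String × List (String × Int)))) (dm_curr : List (String × Int)) : Prop :=
  ∀ row ∈ lm_prev, (row.2.map (·.1)).Nodup
instance (dm_prev : List (String × Int)) (lm_prev : List (String × List (String × List (String × Int)))) (dm_curr : List (String × Int)) : Decidable (Pre_detect_ghosts dm_prev lm_prev dm_curr) := by unfold Pre_detect_ghosts; infer_instance

def pvWitness_detect_ghosts : (List (String × Int)) × (List (String × List (String × List (String × Int)))) × (List (String × Int)) :=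
  ([("a", 1)], [("m", [("t", [("n", 0)])])], [])

def Spec_detect_ghosts (dm_prev : List (String × Int)) (lm_prev : List (String × List (String × List (String × Int)))) (dm_curr : List (String × Int)) (out : List (String × List String)) : Prop := out = detect_ghosts_alt dm_prev lm_prev dm_curr
instance (dm_prev : List (String × Int)) (lm_prev : List (String × List (String × List (String × Int)))) (dm_curr : List (String × Int)) (out : List (String × List String)) : Decidable (Spec_detect_ghosts dm_prev lm_prev dm_curr out) := by unfold Spec_detect_ghosts; infer_instance

-- ===== CLAIM (what is proved, stated in full; the proofs are below) =====
def Claim_equal_detect_ghosts : Prop := ∀ (dm_prev : List (String × Int)) (lm_prev : List (String × List (String × List (String × Int)))) (dm_curr : List (String × Int)), Dom_detect_ghosts dm_prev lm_prev dm_curr → Pre_detect_ghosts dm_prev lm_prev dm_curr → Spec_detect_ghosts dm_prev lm_prev dm_curr (detect_ghosts dm_prev lm_prev dm_curr)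

-- ===== LEMMAS AND PROOFS =====

-- B's inner loop does not touch index entries whose key is absent from this row
theorem idx_getD_untouched (qs : List (String × List (String × Int)))
    (d : PySem.Dict String (PySem.Set String)) (f : String)
    (hf : f ∉ qs.map (·.1)) :
    (qs.foldl (fun d q =>
        d.insert q.1 (PySem.Set.union (d.getD q.1 PySem.Set.empty) (q.2.map (·.1)))) d).getD f PySem.Set.empty
      = d.getD f PySem.Set.empty := by
  induction qs generalizing d with
  | nil => rfl
  | cons q qs ih =>
    simp only [List.map_cons, List.mem_cons, not_or] at hf
    rw [List.foldl_cons, ih _ hf.2, PySem.Dict.getD_insert_of_ne _ _ _ hf.1]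

-- one row of B's index loop, read back at f, is exactly A's per-row update (inner keys distinct)
theorem idx_getD_row (qs : List (String × List (String × Int)))
    (hnd : (qs.map (·.1)).Nodup)
    (d : PySem.Dict String (PySem.Set String)) (f : String) :
    (qs.foldl (fun d q =>
        d.insert q.1 (PySem.Set.union (d.getD q.1 PySem.Set.empty) (q.2.map (·.1)))) d).getD f PySem.Set.empty
      = if (qs.map (·.1)).contains f then
          PySem.Set.update (d.getD f PySem.Set.empty) ((((qs.find? (fun q => q.1 == f)).getD (f, [])).2).map (·.1))
        else d.getD f PySem.Set.empty := by
  induction qs generalizing d with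
  | nil => simp
  | cons q qs ih =>
    simp only [List.map_cons, List.nodup_cons] at hnd
    by_cases hqf : q.1 = f
    · subst hqf
      rw [List.foldl_cons, idx_getD_untouched _ _ _ hnd.1]
      simp [PySem.Dict.getD_insert_self, PySem.Set.union, List.find?_cons_of_pos]
    · rw [List.foldl_cons, ih hnd.2]
      have hne : f ≠ q.1 := fun h => hqf h.symm
      simp only [PySem.Dict.getD_insert_of_ne _ _ _ hne]
      rw [List.map_cons, List.contains_cons, List.find?_cons_of_neg (by simp [hqf])]
      rw [show (f == q.1) = false from beq_eq_false_iff_ne.mpr hne, Bool.false_or]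

-- A's called_names fold equals the entry of B's index at f
theorem called_eq_idx (rows : List (String × List (String × List (String × Int))))
    (hnd : ∀ row ∈ rows, (row.2.map (·.1)).Nodup)
    (d : PySem.Dict String (PySem.Set String)) (f : String) :
    rows.foldl (fun cs row =>
        if (row.2.map (·.1)).contains f then
          PySem.Set.update cs ((((row.2.find? (fun q => q.1 == f)).getD (f, [])).2).map (·.1))
        else cs) (d.getD f PySem.Set.empty)
      = (rows.foldl (fun d row =>
          row.2.foldl (fun d q =>
            d.insert q.1 (PySem.Set.union (d.getD q.1 PySem.Set.empty) (q.2.map (·.1)))) d) d).getD f PySem.Set.empty := by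
  induction rows generalizing d with
  | nil => rfl
  | cons row rows ih =>
    simp only [List.mem_cons, forall_eq_or_imp] at hnd
    rw [List.foldl_cons, List.foldl_cons]
    rw [show (if (row.2.map (·.1)).contains f then
          PySem.Set.update (d.getD f PySem.Set.empty) ((((row.2.find? (fun q => q.1 == f)).getD (f, [])).2).map (·.1))
        else d.getD f PySem.Set.empty)
        = (row.2.foldl (fun d q =>
            d.insert q.1 (PySem.Set.union (d.getD q.1 PySem.Set.empty) (q.2.map (·.1)))) d).getD f PySem.Set.empty
      from (idx_getD_row row.2 hnd.1 d f).symm]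
    exact ih hnd.2 _

-- the keys of B's index are A's prev_targets set
theorem idx_keys (rows : List (String × List (String × List (String × Int))))
    (d : PySem.Dict String (PySem.Set String)) :
    (rows.foldl (fun d row =>
        row.2.foldl (fun d q =>
          d.insert q.1 (PySem.Set.union (d.getD q.1 PySem.Set.empty) (q.2.map (·.1)))) d) d).keys
      = rows.foldl (fun s row => PySem.Set.update s (row.2.map (·.1))) d.keys := by
  induction rows generalizing d with
  | nil => rfl
  | cons row rows ih =>
    rw [List.foldl_cons, List.foldl_cons, ih,
      PySem.Dict.keys_foldl_insert_key row.2 (·.1) _ d]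

theorem idx_keys_nodup (rows : List (String × List (String × List (String × Int))))
    (d : PySem.Dict String (PySem.Set String)) (h : d.keys.Nodup) :
    (rows.foldl (fun d row =>
        row.2.foldl (fun d q =>
          d.insert q.1 (PySem.Set.union (d.getD q.1 PySem.Set.empty) (q.2.map (·.1)))) d) d).keys.Nodup := by
  induction rows generalizing d with
  | nil => exact h
  | cons row rows ih =>
    exact ih _ (PySem.Dict.nodup_keys_foldl_insert_key row.2 (·.1) _ d h)

-- A's ghost-building fold over distinct fresh keys appends the kept pairs in order
theorem ghosts_items (fs : List String) (b : String → Bool) (v : String → List String)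
    (g : PySem.Dict String (List String))
    (hnd : fs.Nodup) (hfresh : ∀ f ∈ fs, g.contains f = false) :
    (fs.foldl (fun g f => if b f then g else g.insert f (v f)) g).items
      = g.items ++ (fs.filter (fun f => !b f)).map (fun f => (f, v f)) := by
  induction fs generalizing g with
  | nil => simp
  | cons f fs ih =>
    simp only [List.nodup_cons] at hnd
    rw [List.foldl_cons]
    by_cases hb : b f
    · rw [if_pos hb, ih g hnd.2 (fun x hx => hfresh x (List.mem_cons_of_mem _ hx))]
      simp [hb]
    · rw [if_neg hb, ih (g.insert f (v f)) hnd.2 ?fresh]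
      · rw [PySem.Dict.items_insert_of_not_contains _ _ (hfresh f (List.mem_cons_self ..))]
        simp [hb]
      case fresh =>
        intro x hx
        rw [PySem.Dict.contains_insert]
        have : x ≠ f := fun he => hnd.1 (he ▸ hx)
        simp [this, hfresh x (List.mem_cons_of_mem _ hx)]

-- ===== VERDICT (by name: the statement is the Claim_ definition above) =====
-- assembly of the whole equivalence, with dm_curr already projected to its key list
theorem assemble (rows : List (String × List (String × List (String × Int))))
    (cur : List String) (hpre : ∀ row ∈ rows, (row.2.map (·.1)).Nodup) :
    ((PySem.Set.diff (rows.foldl (fun s row => PySem.Set.update s (row.2.map (·.1))) PySem.Set.empty)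
        (PySem.Set.ofList cur)).foldl (fun g f =>
      if (rows.foldl (fun cs row =>
            if (row.2.map (·.1)).contains f then
              PySem.Set.update cs ((((row.2.find? (fun q => q.1 == f)).getD (f, [])).2).map (·.1))
            else cs) PySem.Set.empty).isEmpty then g
      else g.insert f (PySem.List.sorted (rows.foldl (fun cs row =>
            if (row.2.map (·.1)).contains f then
              PySem.Set.update cs ((((row.2.find? (fun q => q.1 == f)).getD (f, [])).2).map (·.1))
            else cs) PySem.Set.empty) (·.toList) false)) PySem.Dict.empty).items
    = ((rows.foldl (fun d row =>
          row.2.foldl (fun d q =>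
            d.insert q.1 (PySem.Set.union (d.getD q.1 PySem.Set.empty) (q.2.map (·.1)))) d)
          PySem.Dict.empty).items.filter (fun p => !cur.contains p.1 && !p.2.isEmpty)).map
        (fun p => (p.1, PySem.List.sorted p.2 (·.toList) false)) := by
  have hkeys := idx_keys rows PySem.Dict.empty
  rw [show (PySem.Dict.empty : PySem.Dict String (PySem.Set String)).keys = PySem.Set.empty from rfl] at hkeys
  have hnodup := idx_keys_nodup rows PySem.Dict.empty (by rw [PySem.Dict.keys_empty]; exact List.nodup_nil)
  have hprevnodup : (rows.foldl (fun s row => PySem.Set.update s (row.2.map (·.1))) PySem.Set.empty).Nodup := by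
    rw [← hkeys]; exact hnodup
  have hcall : ∀ f, (rows.foldl (fun cs row =>
        if (row.2.map (·.1)).contains f then
          PySem.Set.update cs ((((row.2.find? (fun q => q.1 == f)).getD (f, [])).2).map (·.1))
        else cs) PySem.Set.empty)
      = (rows.foldl (fun d row =>
          row.2.foldl (fun d q =>
            d.insert q.1 (PySem.Set.union (d.getD q.1 PySem.Set.empty) (q.2.map (·.1)))) d)
          PySem.Dict.empty).getD f PySem.Set.empty := by
    intro f
    rw [← PySem.Dict.getD_empty (ν := PySem.Set String) f PySem.Set.empty]
    exact called_eq_idx rows hpre PySem.Dict.empty f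
  -- A side: the ghost fold appends the kept pairs
  simp only [PySem.Set.diff]
  rw [ghosts_items _ _ _ _
      ((List.Nodup.filter _ hprevnodup))
      (fun f _ => PySem.Dict.contains_empty f)]
  -- B side: items as a map over the keys
  rw [PySem.Dict.items_eq_map_keys _ hnodup PySem.Set.empty, List.filter_map, List.map_map, hkeys]
  simp only [show (PySem.Dict.empty : PySem.Dict String (List String)).items = [] from rfl, List.nil_append, List.filter_filter]
  rw [List.filter_congr (q := fun a =>
        !cur.contains a && !((rows.foldl (fun d row =>
          row.2.foldl (fun d q =>
            d.insert q.1 (PySem.Set.union (d.getD q.1 PySem.Set.empty) (q.2.map (·.1)))) d)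
          PySem.Dict.empty).getD a PySem.Set.empty).isEmpty) ?cond]
  · apply List.map_congr_left
    intro f hf
    simp only [Function.comp]
    rw [hcall f]
  case cond =>
    intro a ha
    rw [hcall a]
    have hcur : (PySem.Set.ofList cur).contains a = cur.contains a := by simp [pysem]
    rw [hcur, Bool.and_comm]

theorem detect_ghosts_spec : Claim_equal_detect_ghosts := by
  intro dm_prev lm_prev dm_curr _ hpre
  unfold Spec_detect_ghosts detect_ghosts detect_ghosts_alt
  dsimp only
  exact assemble lm_prev (dm_curr.map (·.1)) hpre
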